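-- pv_equiv track=rewrite | github.com/hugorolimf/comparar_bases | excel_diff/analysis/schema_detector.py | determine_dominant_type
-- ===== SOURCE A (Python) =====
-- from collections import Counter
--
-- def determine_dominant_type(type_counts: Counter[str]) -> str:
--     meaningful = {key: count for key, count in type_counts.items() if key != "empty" and count > 0}
--     if not meaningful:
--         return "empty"
--     sorted_types = sorted(meaningful.items(), key=lambda item: item[1], reverse=True)
--     if len(sorted_types) == 1:
--         return sorted_types[0][0]
--     top_name, top_count = sorted_types[0]
--     second_count = sorted_types[1][1]
--     if top_count >= second_count * 2:
--         return top_name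
--     return "mixed"
-- ===== SOURCE B (Python) =====
-- def determine_dominant_type(type_counts):
--     meaningful = {key: count for key, count in type_counts.items() if key != "empty" and count > 0}
--     max_name = None
--     max_count = 0
--     second_count = 0
--     for name, count in meaningful.items():
--         if count > max_count:
--             second_count = max_count
--             max_count = count
--             max_name = name
--         elif count > second_count:
--             second_count = count
--     if max_name is None:
--         return "empty"
--     if max_count >= second_count * 2:
--         return max_name
--     return "mixed"
-- ===== Notes on version B (the rewrite author's own statement) =====
-- stated objective: alternative
-- what changed: Replaces building and sorting the full list of meaningful items with a single max/second-max tracking pass over them (no sort, no separate length-1 case), keeping the first-seen maximum as the dominant name.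
import Mathlib
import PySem

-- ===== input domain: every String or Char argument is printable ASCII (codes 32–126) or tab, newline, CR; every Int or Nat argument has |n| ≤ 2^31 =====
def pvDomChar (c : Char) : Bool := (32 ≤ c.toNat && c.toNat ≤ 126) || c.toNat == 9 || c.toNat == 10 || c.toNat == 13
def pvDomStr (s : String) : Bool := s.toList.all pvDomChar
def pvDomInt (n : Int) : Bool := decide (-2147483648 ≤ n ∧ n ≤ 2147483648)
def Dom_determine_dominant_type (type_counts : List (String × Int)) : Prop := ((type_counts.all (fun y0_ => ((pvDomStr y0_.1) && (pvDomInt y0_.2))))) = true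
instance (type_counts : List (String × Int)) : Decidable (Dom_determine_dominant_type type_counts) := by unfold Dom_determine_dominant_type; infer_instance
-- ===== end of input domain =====

-- B replaces the sort of the meaningful items by a single max/second-max tracking pass (alternative decomposition, same cost class).

-- ===== PORT A =====
-- literal port of A: filtered dict comprehension, emptiness test, stable reverse sort by count, then the len-1 / dominance branches
def determine_dominant_type (type_counts : List (String × Int)) : String :=
  let meaningful := type_counts.foldl
    (fun d kv => if kv.1 ≠ "empty" ∧ 0 < kv.2 then d.insert kv.1 kv.2 else d)
    (PySem.Dict.empty : PySem.Dict String Int)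
  if meaningful.items = [] then "empty"
  else
    let sorted_types := PySem.List.sorted meaningful.items (fun it => it.2) true
    if sorted_types.length = 1 then (sorted_types.headD ("", 0)).1
    else
      let top := sorted_types.headD ("", 0)
      let second_count := (sorted_types.getD 1 ("", 0)).2
      if second_count * 2 ≤ top.2 then top.1 else "mixed"

-- ===== PORT B =====
-- B-side helper: the body of Source B's tracking loop (state = (max_name?, max_count, second_count))
def pvScanStep (st : Option String × Int × Int) (kv : String × Int) : Option String × Int × Int :=
  if st.2.1 < kv.2 then (some kv.1, kv.2, st.2.1)
  else if st.2.2 < kv.2 then (st.1, st.2.1, kv.2)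
  else st

def determine_dominant_type_alt (type_counts : List (String × Int)) : String :=
  let meaningful := type_counts.foldl
    (fun d kv => if kv.1 ≠ "empty" ∧ 0 < kv.2 then d.insert kv.1 kv.2 else d)
    (PySem.Dict.empty : PySem.Dict String Int)
  let st := meaningful.items.foldl pvScanStep ((none, 0, 0) : Option String × Int × Int)
  match st.1 with
  | none => "empty"
  | some name => if st.2.2 * 2 ≤ st.2.1 then name else "mixed"

-- ===== PRECONDITION & SPEC =====
def Spec_determine_dominant_type (type_counts : List (String × Int)) (out : String) : Prop := out = determine_dominant_type_alt type_counts
instance (type_counts : List (String × Int)) (out : String) : Decidable (Spec_determine_dominant_type type_counts out) := by unfold Spec_determine_dominant_type; infer_instance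

-- ===== CLAIM (what is proved, stated in full; the proofs are below) =====
def Claim_equal_determine_dominant_type : Prop := ∀ (type_counts : List (String × Int)), Dom_determine_dominant_type type_counts → Spec_determine_dominant_type type_counts (determine_dominant_type type_counts)

-- ===== LEMMAS AND PROOFS =====

-- the part of the sorted list that A's branches actually read: first name, first count, second count
def pvView : List (String × Int) → Option String × Int × Int
  | [] => (none, 0, 0)
  | [a] => (some a.1, a.2, 0)
  | a :: b :: _ => (some a.1, a.2, b.2)

-- all values stored by the filtered dict-building fold are ≥ 1
lemma pvMeaningful_pos (l : List (String × Int)) (d : PySem.Dict String Int)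
    (hd : ∀ p ∈ d.items, 1 ≤ p.2) :
    ∀ p ∈ (l.foldl (fun d kv => if kv.1 ≠ "empty" ∧ 0 < kv.2 then d.insert kv.1 kv.2 else d) d).items, 1 ≤ p.2 := by
  induction l generalizing d with
  | nil => simpa using hd
  | cons x xs ih =>
    simp only [List.foldl_cons]
    split_ifs with hx
    · exact ih _ (fun p hp => by
        rcases (PySem.Dict.mem_items_insert d x.1 x.2 p).1 hp with h | h
        · subst h; omega
        · exact hd _ h.1)
    · exact ih _ hd

-- one insertion-sort step, seen through pvView, is one pvScanStep
lemma pvInsert_view (x : String × Int) (s : List (String × Int)) (hx : 1 ≤ x.2) :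
    pvView (PySem.List.insertBy (fun a b => decide (b.2 < a.2)) x s) = pvScanStep (pvView s) x := by
  match s with
  | [] => simp [PySem.List.insertBy, pvView, pvScanStep]; omega
  | [a] =>
    by_cases h : a.2 < x.2
    · simp [PySem.List.insertBy, pvView, pvScanStep, h]
    · simp [PySem.List.insertBy, pvView, pvScanStep, h]; omega
  | a :: b :: t =>
    by_cases h1 : a.2 < x.2
    · simp [PySem.List.insertBy, pvView, pvScanStep, h1]
    · by_cases h2 : b.2 < x.2 <;>
        simp [PySem.List.insertBy, pvView, pvScanStep, h1, h2]

-- the tracking fold computes exactly pvView of the stable reverse sort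
lemma pvScan_eq_view (m : List (String × Int)) (hm : ∀ p ∈ m, 1 ≤ p.2) :
    m.foldl pvScanStep ((none, 0, 0) : Option String × Int × Int)
      = pvView (PySem.List.sorted m (fun it => it.2) true) := by
  rw [PySem.List.sorted_rev_eq_foldl_insertBy]
  induction m using List.reverseRecOn with
  | nil => rfl
  | append_singleton xs x ih =>
    rw [List.foldl_append, List.foldl_append]
    simp only [List.foldl_cons, List.foldl_nil]
    rw [ih (fun p hp => hm p (by simp [hp]))]
    exact (pvInsert_view x _ (hm x (by simp))).symm

-- ===== VERDICT (by name: the statement is the Claim_ definition above) =====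
theorem determine_dominant_type_spec : Claim_equal_determine_dominant_type := by
  intro type_counts _
  unfold Spec_determine_dominant_type determine_dominant_type determine_dominant_type_alt
  dsimp only
  set m := (type_counts.foldl
    (fun d kv => if kv.1 ≠ "empty" ∧ 0 < kv.2 then d.insert kv.1 kv.2 else d)
    (PySem.Dict.empty : PySem.Dict String Int)).items with hm
  have hpos : ∀ p ∈ m, 1 ≤ p.2 := by
    rw [hm]
    exact pvMeaningful_pos type_counts PySem.Dict.empty (by simp [PySem.Dict.empty])
  rw [pvScan_eq_view m hpos]
  by_cases hnil : m = []
  · simp [hnil, pvView, PySem.List.sorted]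
  · have hs : PySem.List.sorted m (fun it => it.2) true ≠ [] := by
      simpa [PySem.List.sorted_eq_nil_iff] using hnil
    simp only [if_neg hnil]
    match hso : PySem.List.sorted m (fun it => it.2) true with
    | [] => exact absurd hso hs
    | [a] =>
      have ha : 1 ≤ a.2 := hpos a (by
        have := (PySem.List.mem_sorted (xs := m) (key := fun it => it.2) (rev := true) (x := a)).1
        exact this (by rw [hso]; simp))
      simp [pvView]
      omega
    | a :: b :: t =>
      simp [pvView]
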